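-- pv_equiv track=rewrite | github.com/lotar37/arcanoid | olimp/tasks/kege_16.py | foo
-- ===== SOURCE A (Python) =====
-- def foo(n):
--     if n <= 15:
--         return n*n + 11
--     else:
--         if n % 2:
--             return foo(n-1) + 2 * n + 3
--         else:
--             return foo(n//2) + n**3 - 5*n
-- ===== SOURCE B (Python) =====
-- def foo(n):
--     chain = []
--     while n > 15:
--         chain.append(n)
--         n = n - 1 if n % 2 else n // 2
--     return sum(2*m + 3 if m % 2 else m**3 - 5*m for m in chain) + n*n + 11
-- ===== Notes on version B (the rewrite author's own statement) =====
-- stated objective: alternative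
-- what changed: Two-phase computation: first collect the descending chain of n-values into a list, then sum each step's contribution with a generator expression and add the base value, instead of A's direct recursion.
import Mathlib
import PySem

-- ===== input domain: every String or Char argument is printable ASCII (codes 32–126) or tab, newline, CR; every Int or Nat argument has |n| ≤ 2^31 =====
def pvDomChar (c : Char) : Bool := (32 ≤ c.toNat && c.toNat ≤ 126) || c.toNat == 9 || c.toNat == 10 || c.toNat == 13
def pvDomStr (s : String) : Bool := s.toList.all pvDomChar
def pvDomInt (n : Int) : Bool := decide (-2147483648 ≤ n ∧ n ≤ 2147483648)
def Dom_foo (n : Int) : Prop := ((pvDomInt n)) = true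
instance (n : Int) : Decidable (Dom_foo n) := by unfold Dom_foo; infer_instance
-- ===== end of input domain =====

-- B computes the same value in two phases (collect the chain of n-values, then sum contributions) instead of A's direct recursion (alternative decomposition, same cost).


-- ===== PORT A =====
def foo (n : Int) : Int :=
  if n ≤ 15 then n * n + 11
  else if PySem.Int.mod n 2 ≠ 0 then foo (n - 1) + 2 * n + 3
  else foo (PySem.Int.floordiv n 2) + n ^ 3 - 5 * n
termination_by n.toNat
decreasing_by
  · simp only [not_le] at *; omega
  · simp only [not_le, PySem.Int.floordiv] at *
    have h2 : n.fdiv 2 = n / 2 := Int.fdiv_eq_ediv_of_nonneg n (by norm_num)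
    omega

-- ===== PORT B =====
-- phase 1 of Source B: the while loop recording every visited n; returns (chain, final n)
def fooChain (n : Int) : List Int × Int :=
  if n > 15 then
    let r := fooChain (if PySem.Int.mod n 2 ≠ 0 then n - 1 else PySem.Int.floordiv n 2)
    (n :: r.1, r.2)
  else ([], n)
termination_by n.toNat
decreasing_by
  simp only [PySem.Int.floordiv] at *
  have h2 : n.fdiv 2 = n / 2 := Int.fdiv_eq_ediv_of_nonneg n (by omega)
  split <;> omega

-- the generator expression's per-element contribution
def fooStep (m : Int) : Int :=
  if PySem.Int.mod m 2 ≠ 0 then 2 * m + 3 else m ^ 3 - 5 * m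

-- phase 2 of Source B: sum the mapped contributions, add the base value
def foo_alt (n : Int) : Int :=
  let c := fooChain n
  (c.1.map fooStep).sum + c.2 * c.2 + 11

-- ===== PRECONDITION & SPEC =====
def Spec_foo (n : Int) (out : Int) : Prop := out = foo_alt n
instance (n : Int) (out : Int) : Decidable (Spec_foo n out) := by unfold Spec_foo; infer_instance

-- ===== CLAIM (what is proved, stated in full; the proofs are below) =====
def Claim_equal_foo : Prop := ∀ (n : Int), Dom_foo n → Spec_foo n (foo n)

-- ===== LEMMAS AND PROOFS =====

theorem fooChain_eq (n : Int) :
    ((fooChain n).1.map fooStep).sum + (fooChain n).2 * (fooChain n).2 + 11 = foo n := by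
  fun_induction fooChain n with
  | case1 n h r ih =>
      simp only [r]
      simp only [List.map_cons, List.sum_cons]
      rw [foo, if_neg (by omega : ¬ n ≤ 15)]
      by_cases hodd : PySem.Int.mod n 2 ≠ 0
      · simp only [fooStep, dif_pos hodd, if_pos hodd] at ih ⊢
        rw [← ih]; ring
      · simp only [fooStep, dif_neg hodd, if_neg hodd] at ih ⊢
        rw [← ih]; ring
  | case2 n h =>
      rw [foo, if_pos (by omega : n ≤ 15)]
      simp

-- ===== VERDICT (by name: the statement is the Claim_ definition above) =====
theorem foo_spec : Claim_equal_foo := by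
  intro n _
  unfold Spec_foo foo_alt
  rw [← fooChain_eq]
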